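-- pv_equiv track=rewrite | github.com/ElmerDaza/vigilantes_contable_1 | pyt/Recursos.py | cantidad
-- ===== SOURCE A (Python) =====
-- def cantidad(A):
--     cadena = ''
--     cantidades = []
--     for element in A:
--         if(element == '0' or element == '1' or element == '2'
--                 or element == '3' or element == '4' or element == '5'
--                 or element == '6' or element == '7' or element == '8' or element == '9' or element == '-'):
--             cadena += element
--
--         elif(element == ',' or element == ';'):
--
--             cantidades.append(cadena[5:])
--             cadena = ''
--
--     return cantidades
-- ===== SOURCE B (Python) =====
-- def cantidad(A):
--     # Two phases: split the input into raw segments at ','/';' (the trailing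
--     # buffer is never flushed, so it yields no segment), then post-process each
--     # segment: keep digits and '-', drop the first 5 kept chars.
--     segs = []
--     cur = ''
--     for ch in A:
--         if ch == ',' or ch == ';':
--             segs.append(cur)
--             cur = ''
--         else:
--             cur += ch
--     return [''.join(c for c in s if c.isdigit() or c == '-')[5:] for s in segs]
-- ===== Notes on version B (the rewrite author's own statement) =====
-- stated objective: simpler
-- what changed: A filters digits and dashes into a growing buffer and slices it at each delimiter inside one state machine; B first splits the input into raw segments at the delimiters (dropping the never-flushed trailing buffer) and then post-processes each segment with a filter-and-slice comprehension.
import Mathlib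
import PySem

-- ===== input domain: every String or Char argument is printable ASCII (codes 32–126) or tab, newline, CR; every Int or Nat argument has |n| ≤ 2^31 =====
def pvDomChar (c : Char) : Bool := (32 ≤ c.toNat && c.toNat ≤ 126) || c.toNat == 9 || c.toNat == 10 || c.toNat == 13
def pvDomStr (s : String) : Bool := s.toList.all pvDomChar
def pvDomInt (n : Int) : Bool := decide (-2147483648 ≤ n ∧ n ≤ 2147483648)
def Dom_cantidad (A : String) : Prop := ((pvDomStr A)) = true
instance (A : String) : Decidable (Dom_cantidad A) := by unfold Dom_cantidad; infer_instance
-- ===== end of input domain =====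

-- B replaces A's interleaved filter-and-flush state machine by a two-phase
-- decomposition (raw split at ','/';' then a filter-and-slice comprehension); objective: simpler.


-- ===== PORT A =====
-- cadena is kept as List Char (Python str built char by char); cadena[5:] is PySem.List.slice.
def cantidad (A : String) : List String :=
  (A.toList.foldl
    (fun (st : List Char × List String) element =>
      if element == '0' || element == '1' || element == '2'
          || element == '3' || element == '4' || element == '5'
          || element == '6' || element == '7' || element == '8' || element == '9' || element == '-' then
        (st.1 ++ [element], st.2)
      else if element == ',' || element == ';' then
        ([], st.2 ++ [String.ofList (PySem.List.slice st.1 (some 5) none)])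
      else st)
    ([], [])).2

-- ===== PORT B =====
-- phase 1: raw split at ','/';' (trailing buffer dropped, as Source B never appends it)
def pvSplitRaw (l : List Char) : List Char × List (List Char) :=
  l.foldl
    (fun (st : List Char × List (List Char)) ch =>
      if ch == ',' || ch == ';' then ([], st.2 ++ [st.1]) else (st.1 ++ [ch], st.2))
    ([], [])

-- phase 2: the comprehension — keep digits and '-', drop the first 5 kept chars
def pvProcess (s : List Char) : String :=
  String.ofList ((s.filter (fun c => PySem.Chars.isdigit c || c == '-')).drop 5)

def cantidad_alt (A : String) : List String :=
  ((pvSplitRaw A.toList).2).map pvProcess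

-- ===== PRECONDITION & SPEC =====
def Spec_cantidad (A : String) (out : List String) : Prop := out = cantidad_alt A
instance (A : String) (out : List String) : Decidable (Spec_cantidad A out) := by unfold Spec_cantidad; infer_instance

-- ===== CLAIM (what is proved, stated in full; the proofs are below) =====
def Claim_equal_cantidad : Prop := ∀ (A : String), Dom_cantidad A → Spec_cantidad A (cantidad A)

-- ===== LEMMAS AND PROOFS =====

-- A's 11-way or-chain is exactly B's keep predicate
lemma pvChain_eq (c : Char) :
    (c == '0' || c == '1' || c == '2' || c == '3' || c == '4' || c == '5'
      || c == '6' || c == '7' || c == '8' || c == '9' || c == '-')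
    = (PySem.Chars.isdigit c || c == '-') := by
  rw [Bool.eq_iff_iff]
  simp only [Bool.or_eq_true, beq_iff_eq,
    show (PySem.Chars.isdigit c = true) ↔ ('0' ≤ c ∧ c ≤ '9') from by simp [PySem.Chars.isdigit]]
  have hn : ∀ d : Char, c = d ↔ c.toNat = d.toNat := by
    intro d; constructor
    · rintro rfl; rfl
    · intro h; exact Char.ext (UInt32.toNat_inj.mp h)
  rw [Char.le_def, Char.le_def]
  simp only [hn, UInt32.le_iff_toNat_le, Char.toNat]
  simp only [show ('0':Char).val.toNat = 48 from rfl, show ('1':Char).val.toNat = 49 from rfl,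
    show ('2':Char).val.toNat = 50 from rfl, show ('3':Char).val.toNat = 51 from rfl,
    show ('4':Char).val.toNat = 52 from rfl, show ('5':Char).val.toNat = 53 from rfl,
    show ('6':Char).val.toNat = 54 from rfl, show ('7':Char).val.toNat = 55 from rfl,
    show ('8':Char).val.toNat = 56 from rfl, show ('9':Char).val.toNat = 57 from rfl,
    show ('-':Char).val.toNat = 45 from rfl]
  omega

lemma pvKeep_not_delim (c : Char) (h : (PySem.Chars.isdigit c || c == '-') = true) :
    (c == ',' || c == ';') = false := by
  simp only [Bool.or_eq_false_iff, beq_eq_false_iff_ne]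
  refine ⟨?_, ?_⟩ <;> rintro rfl <;> revert h <;> decide

-- loop invariant: A's fold, run with a filtered buffer and a mapped accumulator,
-- tracks B's raw fold
lemma pvLoop (l : List Char) (cur : List Char) (acc : List (List Char)) :
    (l.foldl
      (fun (st : List Char × List String) element =>
        if element == '0' || element == '1' || element == '2'
            || element == '3' || element == '4' || element == '5'
            || element == '6' || element == '7' || element == '8' || element == '9' || element == '-' then
          (st.1 ++ [element], st.2)
        else if element == ',' || element == ';' then
          ([], st.2 ++ [String.ofList (PySem.List.slice st.1 (some 5) none)])
        else st)
      (cur.filter (fun c => PySem.Chars.isdigit c || c == '-'), acc.map pvProcess)).2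
    = ((l.foldl
        (fun (st : List Char × List (List Char)) ch =>
          if ch == ',' || ch == ';' then ([], st.2 ++ [st.1]) else (st.1 ++ [ch], st.2))
        (cur, acc)).2).map pvProcess := by
  induction l generalizing cur acc with
  | nil => simp
  | cons c l ih =>
    simp only [List.foldl_cons]
    rw [pvChain_eq c]
    by_cases hk : (PySem.Chars.isdigit c || c == '-') = true
    · rw [if_pos hk, if_neg (by simp [pvKeep_not_delim c hk])]
      have : cur.filter (fun c => PySem.Chars.isdigit c || c == '-') ++ [c]
          = (cur ++ [c]).filter (fun c => PySem.Chars.isdigit c || c == '-') := by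
        simp [List.filter_append, hk]
      rw [this]
      exact ih (cur ++ [c]) acc
    · have hk' : (fun c => PySem.Chars.isdigit c || c == '-') c = false := by simpa using hk
      rw [if_neg hk]
      by_cases hd : (c == ',' || c == ';') = true
      · rw [if_pos hd, if_pos hd]
        have hflush : String.ofList (PySem.List.slice
            (cur.filter (fun c => PySem.Chars.isdigit c || c == '-')) (some 5) none) = pvProcess cur := by
          rw [PySem.List.slice_from _ (by norm_num)]; rfl
        rw [hflush]
        have : acc.map pvProcess ++ [pvProcess cur] = (acc ++ [cur]).map pvProcess := by simp
        rw [this]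
        simpa using ih [] (acc ++ [cur])
      · rw [if_neg hd, if_neg hd]
        have : cur.filter (fun c => PySem.Chars.isdigit c || c == '-')
            = (cur ++ [c]).filter (fun c => PySem.Chars.isdigit c || c == '-') := by
          simp [List.filter_append, hk']
        rw [this]
        exact ih (cur ++ [c]) acc

-- ===== VERDICT (by name: the statement is the Claim_ definition above) =====
theorem cantidad_spec : Claim_equal_cantidad := by
  intro A _
  unfold Spec_cantidad cantidad cantidad_alt pvSplitRaw
  simpa using pvLoop A.toList [] []
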